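-- pv_equiv track=rewrite | github.com/ArmandSyah/CSI4107-Search-Engine-Project | booleanretrievalmodel/BooleanRetrievalModel.py | build_bigram_index
-- ===== SOURCE A (Python) =====
-- def build_bigram_index(inv_index, token):
--     """
--         Build out the bigram index and return it
--         Structure is as follows:
--
--         {
--             "se": ["sentence","license",...],
--             ...
--         }
--         A dict with string as key, and the values are a list of strings with bigram included
--     """
--     bigrams = [token[i:i + 2] for i in range(1, len(
--         token) - 1, 2)]  # Get all bigrams from the 2nd letter to the 2nd-last letter
--     bigrams.append(token[0])  # first letter
--     bigrams.append(token[-1])  # last letter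
--     bigrams = [''.join(b for b in bigram if b not in '*')  # Filter out any * in the bigrams, as that was causing problems earlier during inverted index search
--                for bigram in bigrams]
--     return {bigram: [index for index in inv_index.keys() if bigram in index] for bigram in bigrams}
-- ===== SOURCE B (Python) =====
-- def build_bigram_index(inv_index, token):
--     # Faster: precompute a substring->keys index by scanning each key once, then answer each bigram by lookup.
--     bigrams = [token[i:i + 2] for i in range(1, len(token) - 1, 2)] + [token[0], token[-1]]
--     bigrams = [''.join(c for c in bg if c != '*') for bg in bigrams]
--     keys = list(inv_index.keys())
--     sub_index = {}
--     for k in keys: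
--         for sub in dict.fromkeys([a + b for a, b in zip(k, k[1:])] + list(k)):
--             sub_index.setdefault(sub, []).append(k)
--     return {bg: (keys if bg == '' else sub_index.get(bg, [])) for bg in bigrams}
-- ===== Notes on version B (the rewrite author's own statement) =====
-- stated objective: faster
-- what changed: Instead of scanning every inverted-index key once per bigram (B*K substring scans), B scans each key once, building a dict from each length-1/2 substring to the keys containing it, and then answers each bigram by a single dict lookup (empty bigram maps to all keys).
import Mathlib
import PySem

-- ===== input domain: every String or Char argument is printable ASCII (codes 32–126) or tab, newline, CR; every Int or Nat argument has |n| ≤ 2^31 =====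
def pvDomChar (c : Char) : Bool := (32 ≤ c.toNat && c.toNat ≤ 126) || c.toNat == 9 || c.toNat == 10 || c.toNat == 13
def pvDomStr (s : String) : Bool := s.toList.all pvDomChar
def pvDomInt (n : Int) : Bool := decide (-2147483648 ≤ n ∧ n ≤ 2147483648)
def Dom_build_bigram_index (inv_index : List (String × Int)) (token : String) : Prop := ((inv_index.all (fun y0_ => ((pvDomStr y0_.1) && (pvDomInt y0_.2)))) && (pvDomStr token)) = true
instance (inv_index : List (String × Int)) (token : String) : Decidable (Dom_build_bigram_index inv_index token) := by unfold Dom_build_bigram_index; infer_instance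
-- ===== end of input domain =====

-- B replaces A's per-bigram scan of all index keys by a single pass over the keys that
-- precomputes a substring→keys dict; equivalence of the RETURN value is proved below.

-- ===== PORT A =====
-- the raw bigrams: token[i:i+2] for i in range(1, len(token)-1, 2), then token[0], token[-1]
-- (token[0]/token[-1] raise IndexError for token = "", excluded by Pre_; `.getD ' '` is only
-- reached outside Pre_)
def pvRawBigrams (tl : List Char) : List (List Char) :=
  ((PySem.List.pyRange 1 ((tl.length : Int) - 1) 2).map
      (fun i => PySem.List.slice tl (some i) (some (i + 2))))
    ++ [[(PySem.List.pyGet? tl 0).getD ' '], [(PySem.List.pyGet? tl (-1)).getD ' ']]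

def build_bigram_index (inv_index : List (String × Int)) (token : String) : List (String × List String) :=
  -- bigrams = [''.join(b for b in bigram if b not in '*') for bigram in bigrams]
  let bigrams := (pvRawBigrams token.toList).map
      (fun bg => bg.filter (fun c => !(PySem.Chars.isIn [c] ['*'])))
  -- {bigram: [index for index in inv_index.keys() if bigram in index] for bigram in bigrams}
  (bigrams.foldl (fun d bg =>
      d.insert (String.mk bg)
        (((PySem.List.dedup (inv_index.map Prod.fst)).filter
            (fun k => PySem.Chars.isIn bg k.toList))))
    PySem.Dict.empty).items

-- ===== PORT B =====
-- Source B: subs = dict.fromkeys(two-char substrings (via zip) + single chars); one pass over keys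
def pvSubsOf (cs : List Char) : List (List Char) :=
  PySem.List.dedup ((cs.zip cs.tail).map (fun p => [p.1, p.2]) ++ cs.map (fun c => [c]))

def pvSubIndex (keys : List String) : PySem.Dict (List Char) (List String) :=
  keys.foldl (fun d k =>
      (pvSubsOf k.toList).foldl (fun d s => d.modify s [] (fun v => v ++ [k])) d)
    PySem.Dict.empty

def build_bigram_index_alt (inv_index : List (String × Int)) (token : String) : List (String × List String) :=
  let bigrams := (pvRawBigrams token.toList).map
      (fun bg => bg.filter (fun c => c != '*'))
  let keys := PySem.List.dedup (inv_index.map Prod.fst)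
  let subIndex := pvSubIndex keys
  (bigrams.foldl (fun d bg =>
      d.insert (String.mk bg) (if bg = [] then keys else subIndex.getD bg []))
    PySem.Dict.empty).items

-- ===== PRECONDITION & SPEC =====
-- Pre_ excludes only token = "": there token[0] raises IndexError in A (and in B).
def Pre_build_bigram_index (inv_index : List (String × Int)) (token : String) : Prop := token ≠ ""
instance (inv_index : List (String × Int)) (token : String) : Decidable (Pre_build_bigram_index inv_index token) := by unfold Pre_build_bigram_index; infer_instance
def pvWitness_build_bigram_index : (List (String × Int)) × String := ([("sentence", 3), ("sea", 1)], "se*a")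

def Spec_build_bigram_index (inv_index : List (String × Int)) (token : String) (out : List (String × List String)) : Prop := out = build_bigram_index_alt inv_index token
instance (inv_index : List (String × Int)) (token : String) (out : List (String × List String)) : Decidable (Spec_build_bigram_index inv_index token out) := by unfold Spec_build_bigram_index; infer_instance

-- ===== CLAIM (what is proved, stated in full; the proofs are below) =====
def Claim_equal_build_bigram_index : Prop := ∀ (inv_index : List (String × Int)) (token : String), Dom_build_bigram_index inv_index token → Pre_build_bigram_index inv_index token → Spec_build_bigram_index inv_index token (build_bigram_index inv_index token)

-- ===== LEMMAS AND PROOFS =====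

theorem pv_infix_singleton (a : Char) (cs : List Char) : [a] <:+: cs ↔ a ∈ cs := by
  constructor
  · intro h; exact h.sublist.subset (by simp)
  · intro h
    obtain ⟨s, t, rfl⟩ := List.append_of_mem h
    exact ⟨s, t, by simp⟩
theorem pv_isIn_star (c : Char) : PySem.Chars.isIn [c] ['*'] = (c == '*') := by
  rcases h : PySem.Chars.isIn [c] ['*'] with _ | _
  · have := (PySem.Chars.isIn_eq_false_iff [c] ['*']).mp h
    rw [pv_infix_singleton] at this; simp at this; simp [this]
  · have := (PySem.Chars.isIn_iff_infix [c] ['*']).mp h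
    rw [pv_infix_singleton] at this; simp at this; simp [this]

theorem pv_infix_pair (a b : Char) (cs : List Char) : [a, b] <:+: cs ↔ (a, b) ∈ cs.zip cs.tail := by
  induction cs with
  | nil => simp
  | cons c cs ih =>
    cases cs with
    | nil => simp [List.infix_cons_iff]
    | cons d cs' =>
      rw [List.infix_cons_iff, ih]
      simp [List.IsPrefix]
theorem pv_raw_len (tl : List Char) : ∀ bg ∈ pvRawBigrams tl, bg.length ≤ 2 := by
  intro bg hbg
  simp only [pvRawBigrams, List.mem_append, List.mem_map] at hbg
  rcases hbg with ⟨i, hi, rfl⟩ | h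
  · have hmem := (PySem.List.mem_pyRange_iff_of_pos (by norm_num) i).mp hi
    have h1 : (1:Int) ≤ i := hmem.1
    have hcast : i = ((i.toNat : Nat) : Int) := by omega
    rw [hcast]
    have h2 : ((i.toNat:Nat):Int) + 2 = ((i.toNat + 2 : Nat) : Int) := by push_cast; ring
    rw [h2, PySem.List.slice_natCast]
    simp
  · simp at h
    rcases h with rfl | rfl <;> simp
theorem pv_mem_subs (bg cs : List Char) (h1 : bg.length = 1 ∨ bg.length = 2) :
    bg ∈ pvSubsOf cs ↔ PySem.Chars.isIn bg cs = true := by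
  rw [PySem.Chars.isIn_iff_infix]
  unfold pvSubsOf
  rw [PySem.List.mem_dedup]
  rcases h1 with h | h
  · obtain ⟨a, rfl⟩ : ∃ a, bg = [a] := by
      match bg, h with | [a], _ => exact ⟨a, rfl⟩
    rw [pv_infix_singleton]
    simp
  · obtain ⟨a, b, rfl⟩ : ∃ a b, bg = [a, b] := by
      match bg, h with | [a, b], _ => exact ⟨a, b, rfl⟩
    rw [pv_infix_pair]
    simp
theorem pv_nodup_subs (cs : List Char) : (pvSubsOf cs).Nodup := PySem.Set.nodup_ofList _
theorem pv_filter_eq_of_nodup {α : Type} [BEq α] [LawfulBEq α] (l : List α) (x : α)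
    (h : l.Nodup) : l.filter (· == x) = if x ∈ l then [x] else [] := by
  induction l with
  | nil => simp
  | cons a l ih =>
    rw [List.nodup_cons] at h
    rw [List.filter_cons]
    by_cases hax : a = x
    · subst hax; simp [ih h.2, h.1]
    · simp only [beq_iff_eq, hax, ite_false, List.mem_cons]
      rw [ih h.2]
      by_cases hx : x ∈ l <;> simp [hx, Ne.symm hax]
theorem pv_subIndex_aux (keys : List String) (bg : List Char)
    (h1 : bg.length = 1 ∨ bg.length = 2) (d : PySem.Dict (List Char) (List String)) :
    (keys.foldl (fun d k => (pvSubsOf k.toList).foldl (fun d s => d.modify s [] (fun v => v ++ [k])) d) d).getD bg []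
      = d.getD bg [] ++ keys.filter (fun k => PySem.Chars.isIn bg k.toList) := by
  induction keys generalizing d with
  | nil => simp
  | cons k keys ih =>
    rw [List.foldl_cons, ih, List.filter_cons]
    have hfold : (pvSubsOf k.toList).foldl (fun d s => d.modify s [] (fun v => v ++ [k])) d
        = ((pvSubsOf k.toList).map (fun s => (s, k))).foldl (fun d p => d.modify p.1 [] (fun v => v ++ [p.2])) d := by
      rw [List.foldl_map]
    rw [hfold, PySem.Dict.getD_foldl_modify_append, List.append_assoc]
    congr 1
    rw [List.filter_map]
    have : ((fun p => p.1 == bg) ∘ (fun s => (s, k))) = (fun s => s == bg) := rfl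
    rw [this, pv_filter_eq_of_nodup _ _ (pv_nodup_subs _)]
    by_cases hin : PySem.Chars.isIn bg k.toList = true
    · rw [if_pos ((pv_mem_subs _ _ h1).mpr hin)]; simp [hin]
    · rw [if_neg (fun hm => hin ((pv_mem_subs _ _ h1).mp hm))]; simp [hin]

theorem pv_value_eq (keys : List String) (bg : List Char) (hlen : bg.length ≤ 2) :
    (if bg = [] then keys else (pvSubIndex keys).getD bg []) =
      keys.filter (fun k => PySem.Chars.isIn bg k.toList) := by
  by_cases hb : bg = []
  · subst hb; simp [PySem.Chars.isIn_nil]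
  · rw [if_neg hb]
    have h1 : bg.length = 1 ∨ bg.length = 2 := by
      have := List.length_pos_of_ne_nil hb; omega
    unfold pvSubIndex
    rw [pv_subIndex_aux keys bg h1 PySem.Dict.empty]
    simp

theorem pv_filter_star (bg : List Char) :
    bg.filter (fun c => !(PySem.Chars.isIn [c] ['*'])) = bg.filter (fun c => c != '*') := by
  apply List.filter_congr
  intro c _
  simp [pv_isIn_star, bne]

-- ===== VERDICT (by name: the statement is the Claim_ definition above) =====
theorem build_bigram_index_spec : Claim_equal_build_bigram_index := by
  intro inv_index token _ _
  unfold Spec_build_bigram_index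
  simp only [build_bigram_index, build_bigram_index_alt]
  have hmap : (pvRawBigrams token.toList).map (fun bg => bg.filter (fun c => !(PySem.Chars.isIn [c] ['*'])))
      = (pvRawBigrams token.toList).map (fun bg => bg.filter (fun c => c != '*')) :=
    List.map_congr_left (fun bg _ => pv_filter_star bg)
  rw [hmap]
  congr 1
  apply PySem.List.foldl_congr_mem
  intro acc bg hbg
  obtain ⟨raw, hraw, rfl⟩ := List.mem_map.mp hbg
  have hlen : (raw.filter (fun c => c != '*')).length ≤ 2 :=
    le_trans (List.length_filter_le _ _) (pv_raw_len _ _ hraw)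
  rw [pv_value_eq _ _ hlen]
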